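-- pv_equiv track=rewrite | github.com/SungHw4/AutoCodeReviewer | AutoCodeReviewer/CodeReviewer.py | extract_meaningful_changes
-- ===== SOURCE A (Python) =====
-- def extract_meaningful_changes(diff_text: str):
--     """의미있는 변경사항만 추출"""
--     if not diff_text or not diff_text.strip():
--         return []
--
--     sections = []
--     current_section = []
--     section_header = None
--     has_actual_change = False
--
--     for line in diff_text.splitlines():
--         # 파일 헤더 스킵
--         if line.startswith("---") or line.startswith("+++"):
--             continue
--
--         # 새 섹션 시작
--         if line.startswith("@@"):
--             # 이전 섹션 저장
--             if current_section and has_actual_change: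
--                 sections.append({
--                     "header": section_header,
--                     "diff": "\n".join(current_section)
--                 })
--
--             # 새 섹션 초기화
--             section_header = line
--             current_section = [line]
--             has_actual_change = False
--             continue
--
--         # 실제 변경사항 체크
--         if line.startswith("+") or line.startswith("-"):
--             # 빈 라인 변경은 무시
--             if line.strip() not in ["+", "-"]:
--                 has_actual_change = True
--
--         current_section.append(line)
--
--     # 마지막 섹션 저장
--     if current_section and has_actual_change:
--         sections.append({
--             "header": section_header,
--             "diff": "\n".join(current_section)
--         })
--
--     return sections
-- ===== SOURCE B (Python) =====
-- def _meaningful(l):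
--     return (l.startswith("+") or l.startswith("-")) and l.strip() not in ("+", "-")
--
--
-- def _split(lines):
--     """Recursively split at each '@@' line after position 0."""
--     for j in range(1, len(lines)):
--         if lines[j].startswith("@@"):
--             return [lines[:j]] + _split(lines[j:])
--     return [lines]
--
--
-- def extract_meaningful_changes(diff_text: str):
--     """의미있는 변경사항만 추출 — recursive divide-at-marker splitting, then a selecting comprehension."""
--     if not diff_text or not diff_text.strip():
--         return []
--     lines = [l for l in diff_text.splitlines()
--              if not (l.startswith("---") or l.startswith("+++"))]
--     return [{"header": g[0] if g[0].startswith("@@") else None,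
--              "diff": "\n".join(g)}
--             for g in _split(lines) if any(map(_meaningful, g))]
-- ===== Notes on version B (the rewrite author's own statement) =====
-- stated objective: alternative
-- what changed: A's single stateful pass (flush-on-@@ with carried header/flag/section state) is replaced by a recursive divide-at-marker function that slices the line list at each '@@' position and a comprehension selecting groups containing a meaningful +/- line.
-- outside the precondition, e.g. on extract_meaningful_changes('+x'): A returns [{'header': None, 'diff': '+x'}], B returns [{'header': None, 'diff': '+x'}]
import Mathlib
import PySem

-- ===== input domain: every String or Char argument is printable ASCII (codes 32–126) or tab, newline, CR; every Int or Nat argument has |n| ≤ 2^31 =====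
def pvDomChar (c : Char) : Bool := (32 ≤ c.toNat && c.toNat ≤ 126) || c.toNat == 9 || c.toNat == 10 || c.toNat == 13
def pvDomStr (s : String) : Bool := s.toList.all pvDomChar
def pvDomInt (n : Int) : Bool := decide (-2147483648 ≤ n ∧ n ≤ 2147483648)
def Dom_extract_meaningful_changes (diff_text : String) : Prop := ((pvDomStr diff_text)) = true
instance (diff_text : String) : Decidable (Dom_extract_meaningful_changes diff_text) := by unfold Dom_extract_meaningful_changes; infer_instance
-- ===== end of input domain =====

-- B replaces A's single stateful flush-on-@@ pass by a recursive divide-at-'@@' splitter plus a selecting map; same cost, different decomposition.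
-- Equivalence is about the RETURN value; under Pre_ no kept section has a None header, which both ports render as "".

-- shared line predicates: the exact tests both Pythons perform on a line
def pvSkip (l : String) : Bool :=
  PySem.Str.startswith l "---" || PySem.Str.startswith l "+++"

def pvIsAt (l : String) : Bool := PySem.Str.startswith l "@@"

def pvMeaning (l : String) : Bool :=
  (PySem.Str.startswith l "+" || PySem.Str.startswith l "-")
    && !(PySem.Str.strip l == "+" || PySem.Str.strip l == "-")

-- the dict {"header": h, "diff": "\n".join(cur)}; h = none (Python None) is excluded by Pre_, rendered "" here
def pvMkSec (h : Option String) (cur : List String) : List (String × String) :=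
  [("header", h.getD ""), ("diff", PySem.Str.join "\n" cur)]

-- ===== PORT A =====
abbrev pvAState := List (List (String × String)) × List String × Option String × Bool

def pvStepA (st : pvAState) (line : String) : pvAState :=
  if pvSkip line then st
  else
    match st with
    | (secs, cur, hdr, flag) =>
      if pvIsAt line then
        ((if !cur.isEmpty && flag then secs ++ [pvMkSec hdr cur] else secs), [line], some line, false)
      else
        (secs, cur ++ [line], hdr, if pvMeaning line then true else flag)

def extract_meaningful_changes (diff_text : String) : List (List (String × String)) :=
  if diff_text == "" || PySem.Str.strip diff_text == "" then []
  else
    match (PySem.Str.splitlines diff_text).foldl pvStepA ([], [], none, false) with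
    | (secs, cur, hdr, flag) =>
      if !cur.isEmpty && flag then secs ++ [pvMkSec hdr cur] else secs

-- ===== PORT B =====
-- _split: first j ≥ 1 with lines[j] an '@@' line; lines[:j] = l0 :: takeWhile (¬@@) rest and
-- lines[j:] = dropWhile (¬@@) rest, which is exact for this search-then-slice loop
def pvSplit : List String → List (List String)
  | [] => [[]]
  | l0 :: rest =>
    match hs : rest.dropWhile (fun l => !pvIsAt l) with
    | [] => [l0 :: rest]
    | a :: t => (l0 :: rest.takeWhile (fun l => !pvIsAt l)) :: pvSplit (a :: t)
termination_by ls => ls.length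
decreasing_by
  have h1 : (a :: t).length ≤ rest.length := by
    rw [← hs]; exact rest.length_dropWhile_le _
  simp only [List.length_cons] at *
  omega

-- g[0] if g[0].startswith("@@") else None (g nonempty whenever it is rendered)
def pvHdrOf (g : List String) : Option String :=
  match g with
  | h :: _ => if pvIsAt h then some h else none
  | [] => none

def extract_meaningful_changes_alt (diff_text : String) : List (List (String × String)) :=
  if diff_text == "" || PySem.Str.strip diff_text == "" then []
  else
    let lines := (PySem.Str.splitlines diff_text).filter (fun l => !pvSkip l)
    ((pvSplit lines).filter (fun g => g.any pvMeaning)).map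
      (fun g => pvMkSec (pvHdrOf g) g)

-- ===== PRECONDITION & SPEC =====
-- Pre_ excludes inputs where the region before the first '@@' line contains a real +/- change:
-- there A returns a dict with "header": None, a value outside the declared String type.
def Pre_extract_meaningful_changes (diff_text : String) : Prop :=
  (((PySem.Str.splitlines diff_text).takeWhile
      (fun l => !PySem.Str.startswith l "@@")).all
    (fun l => pvSkip l || !pvMeaning l)) = true
instance (diff_text : String) : Decidable (Pre_extract_meaningful_changes diff_text) := by
  unfold Pre_extract_meaningful_changes; infer_instance

def pvWitness_extract_meaningful_changes : String := "@@ -1 +1 @@\n+x"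

def Spec_extract_meaningful_changes (diff_text : String) (out : List (List (String × String))) : Prop := out = extract_meaningful_changes_alt diff_text
instance (diff_text : String) (out : List (List (String × String))) : Decidable (Spec_extract_meaningful_changes diff_text out) := by unfold Spec_extract_meaningful_changes; infer_instance

-- ===== CLAIM (what is proved, stated in full; the proofs are below) =====
def Claim_equal_extract_meaningful_changes : Prop := ∀ (diff_text : String), Dom_extract_meaningful_changes diff_text → Pre_extract_meaningful_changes diff_text → Spec_extract_meaningful_changes diff_text (extract_meaningful_changes diff_text)

-- ===== LEMMAS AND PROOFS =====

-- what A's loop still produces from state (·, acc, hdr, acc.any pvMeaning) on remaining lines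
def pvRestA (hdr : Option String) (acc : List String) : List String → List (List (String × String))
  | [] => if acc.any pvMeaning then [pvMkSec hdr acc] else []
  | l :: ls =>
    if pvIsAt l then
      (if acc.any pvMeaning then [pvMkSec hdr acc] else []) ++ pvRestA (some l) [l] ls
    else pvRestA hdr (acc ++ [l]) ls

-- what B renders from a list of lines
def pvRenderB (lines : List String) : List (List (String × String)) :=
  ((pvSplit lines).filter (fun g => g.any pvMeaning)).map (fun g => pvMkSec (pvHdrOf g) g)

theorem pvAny_ne_nil {g : List String} (h : g.any pvMeaning = true) : g.isEmpty = false := by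
  cases g with
  | nil => simp at h
  | cons a t => rfl

theorem pvMeaning_at {l : String} (h : pvIsAt l = true) : pvMeaning l = false := by
  have h' : ['@','@'] <+: l.toList := (PySem.Chars.startswith_iff _ _).mp (by simpa [pvIsAt] using h)
  obtain ⟨t, ht⟩ := h'
  have h1 : PySem.Chars.startswith l.toList ['+'] = false := by
    rw [← Bool.not_eq_true]
    intro hh
    obtain ⟨u, hu⟩ := (PySem.Chars.startswith_iff _ _).mp hh
    rw [← ht] at hu
    simp at hu
  have h2 : PySem.Chars.startswith l.toList ['-'] = false := by
    rw [← Bool.not_eq_true]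
    intro hh
    obtain ⟨u, hu⟩ := (PySem.Chars.startswith_iff _ _).mp hh
    rw [← ht] at hu
    simp at hu
  simp [pvMeaning, h1, h2]

theorem pvSplit_nilcase (l0 : String) (rest : List String)
    (h : rest.dropWhile (fun l => !pvIsAt l) = []) : pvSplit (l0 :: rest) = [l0 :: rest] := by
  unfold pvSplit; split <;> simp_all

theorem pvSplit_conscase (l0 : String) (rest : List String) (a : String) (t : List String)
    (h : rest.dropWhile (fun l => !pvIsAt l) = a :: t) :
    pvSplit (l0 :: rest) = (l0 :: rest.takeWhile (fun l => !pvIsAt l)) :: pvSplit (a :: t) := by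
  conv_lhs => unfold pvSplit
  split
  · simp_all
  · next a' t' hs => rw [h] at hs; cases hs; rfl

theorem pvStepA_skip (st : pvAState) (l : String) (h : pvSkip l = true) :
    pvStepA st l = st := by simp [pvStepA, h]

theorem foldA_filter (ls : List String) (st : pvAState) :
    ls.foldl pvStepA st = (ls.filter (fun l => !pvSkip l)).foldl pvStepA st := by
  induction ls generalizing st with
  | nil => rfl
  | cons l ls ih =>
    by_cases h : pvSkip l = true
    · simp [h, pvStepA_skip st l h, ih]
    · simp only [Bool.not_eq_true] at h
      simp [h, ih]

-- A's fold, started from an invariant-respecting state, computes pvRestA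
theorem pvFoldA_rest (ls : List String) (hs : ∀ l ∈ ls, pvSkip l = false) :
    ∀ (secs : List (List (String × String))) (acc : List String) (hdr : Option String),
    (match ls.foldl pvStepA (secs, acc, hdr, acc.any pvMeaning) with
     | (s, cur, h, flag) => if !cur.isEmpty && flag then s ++ [pvMkSec h cur] else s)
      = secs ++ pvRestA hdr acc ls := by
  induction ls with
  | nil =>
    intro secs acc hdr
    cases hf : acc.any pvMeaning with
    | false => simp [pvRestA, hf]
    | true => simp [pvRestA, hf, pvAny_ne_nil hf]
  | cons l ls ih =>
    intro secs acc hdr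
    have hl : pvSkip l = false := hs l (by simp)
    have hs' : ∀ x ∈ ls, pvSkip x = false := fun x hx => hs x (by simp [hx])
    by_cases hat : pvIsAt l = true
    · have hml : pvMeaning l = false := pvMeaning_at hat
      have h1 : pvStepA (secs, acc, hdr, acc.any pvMeaning) l
          = ((if !acc.isEmpty && acc.any pvMeaning then secs ++ [pvMkSec hdr acc] else secs),
              [l], some l, false) := by
        simp [pvStepA, hl, hat]
      have h2 : ([l].any pvMeaning) = false := by simp [hml]
      rw [List.foldl_cons, h1]
      have h3 := ih hs'
        (if !acc.isEmpty && acc.any pvMeaning then secs ++ [pvMkSec hdr acc] else secs) [l] (some l)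
      rw [h2] at h3
      rw [h3]
      cases hf : acc.any pvMeaning with
      | false => simp [pvRestA, hat, hf]
      | true => simp [pvRestA, hat, hf, pvAny_ne_nil hf]
    · simp only [Bool.not_eq_true] at hat
      have h1 : pvStepA (secs, acc, hdr, acc.any pvMeaning) l
          = (secs, acc ++ [l], hdr, (acc ++ [l]).any pvMeaning) := by
        simp only [pvStepA, hl, hat, Bool.false_eq_true, if_false,
          List.any_append, List.any_cons, List.any_nil]
        cases hm : pvMeaning l <;> simp
      rw [List.foldl_cons, h1, ih hs' secs (acc ++ [l]) hdr]
      simp [pvRestA, hat]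

-- pvRestA in span normal form: flush the chunk accumulated so far, then continue at the next '@@'
theorem pvRestA_span (ls : List String) :
    ∀ (acc : List String) (hdr : Option String),
    pvRestA hdr acc ls
      = (if (acc ++ ls.takeWhile (fun l => !pvIsAt l)).any pvMeaning
          then [pvMkSec hdr (acc ++ ls.takeWhile (fun l => !pvIsAt l))] else [])
        ++ (match ls.dropWhile (fun l => !pvIsAt l) with
            | [] => []
            | a :: t => pvRestA (some a) [a] t) := by
  induction ls with
  | nil => intro acc hdr; simp [pvRestA]
  | cons l ls ih =>
    intro acc hdr
    by_cases hat : pvIsAt l = true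
    · simp [pvRestA, hat]
    · simp only [Bool.not_eq_true] at hat
      have h1 : pvRestA hdr acc (l :: ls) = pvRestA hdr (acc ++ [l]) ls := by
        simp [pvRestA, hat]
      rw [h1, ih (acc ++ [l]) hdr]
      simp [List.takeWhile_cons, List.dropWhile_cons, hat]

theorem pvDropWhileHead {p : String → Bool} {l : List String} {a : String} {t : List String}
    (h : l.dropWhile p = a :: t) : p a = false := by
  induction l with
  | nil => simp at h
  | cons x xs ih =>
    cases hpx : p x with
    | true => rw [List.dropWhile_cons, hpx] at h; simp only [if_true] at h; exact ih h
    | false =>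
      rw [List.dropWhile_cons, hpx] at h
      simp only [Bool.false_eq_true, if_false, List.cons.injEq] at h
      rw [← h.1]; exact hpx

-- groups produced by pvSplit starting at a line l0 render exactly what A's loop still emits
theorem pvSplit_rest (n : ℕ) : ∀ (l0 : String) (rest : List String), rest.length ≤ n →
    pvRestA (if pvIsAt l0 then some l0 else none) [l0] rest = pvRenderB (l0 :: rest) := by
  induction n with
  | zero =>
    intro l0 rest hn
    have hr : rest = [] := by
      cases rest with
      | nil => rfl
      | cons a t => simp at hn
    subst hr
    have hsp : pvSplit [l0] = [[l0]] := pvSplit_nilcase l0 [] (by simp)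
    simp only [pvRenderB, hsp, pvRestA]
    cases hf : pvMeaning l0 with
    | false => simp [List.filter, hf]
    | true => simp [List.filter, hf, pvHdrOf]
  | succ n ih =>
    intro l0 rest hn
    rw [pvRestA_span]
    cases hd : rest.dropWhile (fun l => !pvIsAt l) with
    | nil =>
      have htw : rest.takeWhile (fun l => !pvIsAt l) = rest := by
        have hcat := List.takeWhile_append_dropWhile (p := fun l => !pvIsAt l) (l := rest)
        rw [hd] at hcat; simpa using hcat
      rw [pvRenderB, pvSplit_nilcase l0 rest hd, htw]
      cases hf : (l0 :: rest).any pvMeaning with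
      | false => simp [List.filter, hf]
      | true => simp [List.filter, hf, pvHdrOf]
    | cons a t =>
      have hlen : (a :: t).length ≤ rest.length := by
        rw [← hd]; exact rest.length_dropWhile_le _
      have hta : pvIsAt a = true := by
        have := pvDropWhileHead hd
        simpa using this
      have hrec := ih a t (by simp only [List.length_cons] at hlen; omega)
      rw [hta] at hrec
      simp only [if_true] at hrec
      have hmatch : (match a :: t with
          | [] => ([] : List (List (String × String)))
          | a :: t => pvRestA (some a) [a] t) = pvRestA (some a) [a] t := rfl
      rw [pvRenderB, pvSplit_conscase l0 rest a t hd, hmatch, hrec]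
      simp only [pvRenderB]
      cases hf : (l0 :: rest.takeWhile (fun l => !pvIsAt l)).any pvMeaning with
      | false => simp [List.filter_cons, List.singleton_append, hf]
      | true => simp [List.filter_cons, List.singleton_append, hf, pvHdrOf]

theorem pvRest_top (lines : List String) :
    pvRestA none [] lines = pvRenderB lines := by
  cases lines with
  | nil => simp [pvRestA, pvRenderB, pvSplit, List.filter]
  | cons l0 rest =>
    have hkey := pvSplit_rest rest.length l0 rest (le_refl _)
    by_cases hat : pvIsAt l0 = true
    · rw [hat] at hkey; simp only [if_true] at hkey
      rw [← hkey]
      simp [pvRestA, hat]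
    · simp only [Bool.not_eq_true] at hat
      rw [hat] at hkey; simp only [Bool.false_eq_true, if_false] at hkey
      rw [← hkey]
      simp [pvRestA, hat]

-- ===== VERDICT (by name: the statement is the Claim_ definition above) =====
theorem extract_meaningful_changes_spec : Claim_equal_extract_meaningful_changes := by
  intro diff_text _ _
  unfold Spec_extract_meaningful_changes
  unfold extract_meaningful_changes extract_meaningful_changes_alt
  by_cases hg : (diff_text == "" || PySem.Str.strip diff_text == "") = true
  · simp [hg]
  · simp only [Bool.not_eq_true] at hg
    rw [hg]
    simp only [Bool.false_eq_true, if_false]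
    rw [foldA_filter]
    have hfilt : ∀ l ∈ (PySem.Str.splitlines diff_text).filter (fun l => !pvSkip l),
        pvSkip l = false := by
      intro l hl; simp only [List.mem_filter] at hl; simpa using hl.2
    have h1 := pvFoldA_rest _ hfilt [] [] none
    rw [pvRest_top] at h1
    simp only [List.any_nil] at h1
    simpa [pvRenderB] using h1
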